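-- pv_equiv track=rewrite | github.com/simba28/september-leetcode-challenge | day06_imageOverlap.py | shiftCount
-- ===== SOURCE A (Python) =====
-- def shiftCount(A, B):
--
--     n, count = len(A), 0
--
--     for x in range(n):
--         for y in range(n):
--             tmp = 0
--             for i in range(y,n):
--                 for j in range(x,n):
--                     if A[i][j]==1 and B[i-y][j-x]==1:
--                         tmp += 1
--             count = max(tmp, count)
--
--     return count
-- ===== SOURCE B (Python) =====
-- def _ones(M, n):
--     return [(i, j) for i, row in enumerate(M[:n]) for j, v in enumerate(row[:n]) if v == 1]
--
-- def _offs(A, B):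
--     n = len(A)
--     return [(ai - bi, aj - bj) for ai, aj in _ones(A, n) for bi, bj in _ones(B, n)
--             if bi <= ai and bj <= aj]
--
-- def shiftCount(A, B):
--     cnt = {}
--     for k in _offs(A, B):
--         cnt[k] = cnt.get(k, 0) + 1
--     return max(cnt.values(), default=0)
-- ===== Notes on version B (the rewrite author's own statement) =====
-- stated objective: faster
-- what changed: Instead of recomputing the overlap for every shift with four nested loops, B collects the 1-cells of both matrices once and tallies each nonnegative offset between a 1 of A and a 1 of B in a dict, returning the largest tally.
import Mathlib
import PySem

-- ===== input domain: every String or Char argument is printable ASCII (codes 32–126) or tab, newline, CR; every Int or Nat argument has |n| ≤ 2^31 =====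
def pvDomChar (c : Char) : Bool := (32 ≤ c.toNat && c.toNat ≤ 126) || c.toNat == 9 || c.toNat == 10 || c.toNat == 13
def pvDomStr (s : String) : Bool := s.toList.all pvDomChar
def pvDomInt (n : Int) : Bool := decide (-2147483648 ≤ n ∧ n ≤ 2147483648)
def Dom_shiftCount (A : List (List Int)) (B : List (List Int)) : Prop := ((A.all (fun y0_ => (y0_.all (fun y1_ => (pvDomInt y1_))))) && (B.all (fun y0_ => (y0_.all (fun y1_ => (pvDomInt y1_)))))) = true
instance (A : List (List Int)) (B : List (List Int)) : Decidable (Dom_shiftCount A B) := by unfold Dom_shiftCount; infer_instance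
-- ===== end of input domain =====

-- B replaces A's O(n^4) try-every-shift scan by one tally of the offsets between 1-cells of A and B.

-- ===== PORT A =====
-- M[i][j] read with defaults; exact where the index is in range, which Pre_ guarantees for every read A makes
def pvGet (M : List (List Int)) (i j : Int) : Int :=
  PySem.List.pyGetD (PySem.List.pyGetD M i []) j 0

def shiftCount (A : List (List Int)) (B : List (List Int)) : Int :=
  let n : Int := A.length
  (PySem.List.pyRange 0 n 1).foldl (fun count x =>
    (PySem.List.pyRange 0 n 1).foldl (fun count y =>
      let tmp := (PySem.List.pyRange y n 1).foldl (fun tmp i =>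
        (PySem.List.pyRange x n 1).foldl (fun tmp j =>
          if pvGet A i j == 1 && pvGet B (i - y) (j - x) == 1 then tmp + 1 else tmp) tmp) 0
      max tmp count) count) 0

-- ===== PORT B =====
-- _ones(M, n): coordinates of the 1-entries of the top-left n×n window of M
def pvOnes (M : List (List Int)) (n : Int) : List (Int × Int) :=
  (PySem.List.enumerate (PySem.List.slice M none (some n))).flatMap (fun ir =>
    ((PySem.List.enumerate (PySem.List.slice ir.2 none (some n))).filter (fun jv => jv.2 == 1)).map
      (fun jv => (ir.1, jv.1)))

-- _offs(A, B): the nonnegative offsets (ai-bi, aj-bj) over pairs of 1-cells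
def pvOffs (A : List (List Int)) (B : List (List Int)) : List (Int × Int) :=
  (pvOnes A (A.length : Int)).flatMap (fun a =>
    ((pvOnes B (A.length : Int)).filter (fun b => decide (b.1 ≤ a.1) && decide (b.2 ≤ a.2))).map
      (fun b => (a.1 - b.1, a.2 - b.2)))

def shiftCount_alt (A : List (List Int)) (B : List (List Int)) : Int :=
  let cnt := (pvOffs A B).foldl (fun d k => d.insert k (d.getD k 0 + 1)) PySem.Dict.empty
  match PySem.List.max? cnt.values (fun v => v) with
  | none => 0
  | some m => m

-- ===== PRECONDITION & SPEC =====
-- Exactly the inputs on which the Python A returns (no IndexError): every row of A reaches width n,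
-- and every B-cell that some 1 of A gets paired with exists.
def Pre_shiftCount (A : List (List Int)) (B : List (List Int)) : Prop :=
  (∀ r ∈ A, A.length ≤ r.length) ∧
  (∀ i < A.length, ∀ j < A.length,
    (A.getD i []).getD j 0 = 1 →
      i < B.length ∧ ∀ p ≤ i, j < (B.getD p []).length)
instance (A : List (List Int)) (B : List (List Int)) : Decidable (Pre_shiftCount A B) := by
  unfold Pre_shiftCount; infer_instance

def pvWitness_shiftCount : List (List Int) × List (List Int) := ([[1, 0], [0, 1]], [[0, 1], [1, 0]])

def Spec_shiftCount (A : List (List Int)) (B : List (List Int)) (out : Int) : Prop := out = shiftCount_alt A B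
instance (A : List (List Int)) (B : List (List Int)) (out : Int) : Decidable (Spec_shiftCount A B out) := by unfold Spec_shiftCount; infer_instance

-- ===== CLAIM (what is proved, stated in full; the proofs are below) =====
def Claim_equal_shiftCount : Prop := ∀ (A : List (List Int)) (B : List (List Int)), Dom_shiftCount A B → Pre_shiftCount A B → Spec_shiftCount A B (shiftCount A B)

-- ===== LEMMAS AND PROOFS =====

def pvTmp (A B : List (List Int)) (x y : Int) : Int :=
  (PySem.List.pyRange y (A.length : Int) 1).foldl (fun tmp i =>
    (PySem.List.pyRange x (A.length : Int) 1).foldl (fun tmp j =>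
      if pvGet A i j == 1 && pvGet B (i - y) (j - x) == 1 then tmp + 1 else tmp) tmp) 0

theorem shiftCount_eq (A B : List (List Int)) :
    shiftCount A B = (PySem.List.pyRange 0 (A.length : Int) 1).foldl (fun c x =>
      (PySem.List.pyRange 0 (A.length : Int) 1).foldl (fun c y => max (pvTmp A B x y) c) c) 0 := rfl

theorem pvMax1 (l : List Int) (f : Int → Int) (a : Int) :
    a ≤ l.foldl (fun c x => max (f x) c) a ∧
    (∀ x ∈ l, f x ≤ l.foldl (fun c x => max (f x) c) a) ∧
    (l.foldl (fun c x => max (f x) c) a = a ∨ ∃ x ∈ l, l.foldl (fun c x => max (f x) c) a = f x) := by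
  induction l generalizing a with
  | nil => simp
  | cons h t ih =>
    obtain ⟨h1, h2, h3⟩ := ih (max (f h) a)
    simp only [List.foldl_cons]
    refine ⟨le_trans (le_max_right _ _) h1, ?_, ?_⟩
    · intro x hx
      rcases List.mem_cons.mp hx with rfl | hx
      · exact le_trans (le_max_left _ _) h1
      · exact h2 x hx
    · rcases h3 with heq | ⟨x, hx, heq⟩
      · rcases max_choice (f h) a with hm | hm
        · exact Or.inr ⟨h, List.mem_cons_self, by rw [heq, hm]⟩
        · exact Or.inl (by rw [heq, hm])
      · exact Or.inr ⟨x, List.mem_cons_of_mem _ hx, heq⟩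

theorem pvMax2 (l l' : List Int) (f : Int → Int → Int) (a : Int) :
    a ≤ l.foldl (fun c x => l'.foldl (fun c y => max (f x y) c) c) a ∧
    (∀ x ∈ l, ∀ y ∈ l', f x y ≤ l.foldl (fun c x => l'.foldl (fun c y => max (f x y) c) c) a) ∧
    (l.foldl (fun c x => l'.foldl (fun c y => max (f x y) c) c) a = a ∨
      ∃ x ∈ l, ∃ y ∈ l', l.foldl (fun c x => l'.foldl (fun c y => max (f x y) c) c) a = f x y) := by
  induction l generalizing a with
  | nil => simp
  | cons h t ih =>
    obtain ⟨g1, g2, g3⟩ := pvMax1 l' (f h) a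
    obtain ⟨h1, h2, h3⟩ := ih (l'.foldl (fun c y => max (f h y) c) a)
    simp only [List.foldl_cons]
    refine ⟨le_trans g1 h1, ?_, ?_⟩
    · intro x hx y hy
      rcases List.mem_cons.mp hx with rfl | hx
      · exact le_trans (g2 y hy) h1
      · exact h2 x hx y hy
    · rcases h3 with heq | ⟨x, hx, y, hy, heq⟩
      · rcases g3 with geq | ⟨y, hy, geq⟩
        · exact Or.inl (heq.trans geq)
        · exact Or.inr ⟨h, List.mem_cons_self, y, hy, heq.trans geq⟩
      · exact Or.inr ⟨x, List.mem_cons_of_mem _ hx, y, hy, heq⟩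

theorem pvOnes_mem (M : List (List Int)) (n : Nat) (p : Int × Int) :
    p ∈ pvOnes M (n : Int) ↔ ∃ (i j : Nat), p = ((i : Int), (j : Int)) ∧ i < n ∧ i < M.length ∧
      j < n ∧ j < (M.getD i []).length ∧ (M.getD i []).getD j 0 = 1 := by
  simp only [pvOnes, PySem.List.slice_to_natCast, List.mem_flatMap, List.mem_map,
    List.mem_filter, PySem.List.mem_enumerate_iff, beq_iff_eq]
  constructor
  · rintro ⟨ir, ⟨k, hk, rfl⟩, jv, ⟨⟨k2, hk2, rfl⟩, h1⟩, rfl⟩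
    simp only [List.length_take, lt_min_iff, List.getElem_take] at hk hk2 h1 ⊢
    refine ⟨k, k2, by simp, hk.1, hk.2, hk2.1, ?_, ?_⟩
    · rw [List.getD_eq_getElem _ _ hk.2]; exact hk2.2
    · rw [List.getD_eq_getElem _ _ hk.2, List.getD_eq_getElem _ _ hk2.2]; exact h1
  · rintro ⟨i, j, rfl, h1, h2, h3, h4, h5⟩
    rw [List.getD_eq_getElem _ _ h2] at h4 h5
    rw [List.getD_eq_getElem _ _ h4] at h5
    refine ⟨(0 + (i : Int), (List.take n M)[i]'(by simp [List.length_take]; omega)),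
      ⟨i, by simp [List.length_take]; omega, rfl⟩,
      (0 + (j : Int), (List.take n ((List.take n M)[i]'(by simp [List.length_take]; omega)))[j]'
        (by simp [List.length_take, List.getElem_take]; omega)),
      ⟨⟨j, by simp [List.length_take, List.getElem_take]; omega, rfl⟩, ?_⟩, by simp⟩
    simpa [List.getElem_take] using h5

theorem pvOnes_bounds (M : List (List Int)) (n : Nat) (p : Int × Int) (hp : p ∈ pvOnes M (n : Int)) :
    0 ≤ p.1 ∧ p.1 < (n : Int) ∧ 0 ≤ p.2 ∧ p.2 < (n : Int) := by
  obtain ⟨i, j, rfl, hi, _, hj, _, _⟩ := (pvOnes_mem M n p).mp hp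
  simp only []
  refine ⟨by positivity, by exact_mod_cast hi, by positivity, by exact_mod_cast hj⟩

theorem pvOnes_nodup (M : List (List Int)) (n : Int) : (pvOnes M n).Nodup := by
  unfold pvOnes
  rw [List.nodup_flatMap]
  constructor
  · intro ir _
    have hpw : (((PySem.List.enumerate (PySem.List.slice ir.2 none (some n))).filter
        (fun jv => jv.2 == 1)).map (fun jv => jv.1)).Pairwise (· < ·) := by
      apply List.Pairwise.map
      · exact fun a b h => h
      · exact List.Pairwise.filter _ (PySem.List.pairwise_lt_enumerate _ _)
    have hnd : (((PySem.List.enumerate (PySem.List.slice ir.2 none (some n))).filter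
        (fun jv => jv.2 == 1)).map (fun jv => jv.1)).Nodup := hpw.imp (fun h => ne_of_lt h)
    have : ((PySem.List.enumerate (PySem.List.slice ir.2 none (some n))).filter
        (fun jv => jv.2 == 1)).map (fun jv => (ir.1, jv.1))
        = (((PySem.List.enumerate (PySem.List.slice ir.2 none (some n))).filter
        (fun jv => jv.2 == 1)).map (fun jv => jv.1)).map (fun q => (ir.1, q)) := by
      rw [List.map_map]; rfl
    rw [this]
    exact hnd.map (fun a b h => by simpa using h)
  · apply List.Pairwise.imp ?_ (PySem.List.pairwise_lt_enumerate _ _)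
    intro a b hab
    simp only [Function.onFun, List.disjoint_left]
    rintro x hx hx'
    simp only [List.mem_map, List.mem_filter] at hx hx'
    obtain ⟨jv, _, rfl⟩ := hx
    obtain ⟨jv', _, h⟩ := hx'
    have : b.1 = a.1 := by injection h
    omega

theorem pvOnes_count (M : List (List Int)) (n : Int) (p : Int × Int) :
    (pvOnes M n).count p = if p ∈ pvOnes M n then 1 else 0 := by
  have hle := List.nodup_iff_count_le_one.mp (pvOnes_nodup M n) p
  split
  · next h => have := List.count_pos_iff.mpr h; omega
  · next h => exact List.count_eq_zero.mpr h

theorem pvOffs_count (A B : List (List Int)) (y x : Int) (hy : 0 ≤ y) (hx : 0 ≤ x) :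
    (pvOffs A B).count (y, x)
      = ((pvOnes A (A.length : Int)).map
          (fun a => (pvOnes B (A.length : Int)).count (a.1 - y, a.2 - x))).sum := by
  unfold pvOffs
  rw [List.count_flatMap]
  apply congrArg
  apply List.map_congr_left
  intro a _
  simp only [Function.comp_apply]
  rw [List.count_eq_countP, List.countP_map, List.countP_filter, List.count_eq_countP]
  apply List.countP_congr
  intro b _
  simp only [Function.comp_apply, beq_iff_eq, Prod.mk.injEq, Bool.and_eq_true,
    decide_eq_true_eq]
  constructor
  · rintro ⟨⟨e1, e2⟩, _, _⟩
    have : b.1 = a.1 - y := by omega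
    have : b.2 = a.2 - x := by omega
    ext <;> omega
  · rintro ⟨e1, e2⟩; refine ⟨⟨by omega, by omega⟩, by omega, by omega⟩

theorem pvOffs_bounds (A B : List (List Int)) (k : Int × Int) (hk : k ∈ pvOffs A B) :
    0 ≤ k.1 ∧ k.1 < (A.length : Int) ∧ 0 ≤ k.2 ∧ k.2 < (A.length : Int) := by
  unfold pvOffs at hk
  simp only [List.mem_flatMap, List.mem_map, List.mem_filter, Bool.and_eq_true,
    decide_eq_true_eq] at hk
  obtain ⟨a, ha, b, ⟨hb, hb1, hb2⟩, rfl⟩ := hk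
  obtain ⟨ha1, ha2, ha3, ha4⟩ := pvOnes_bounds A A.length a ha
  obtain ⟨hc1, hc2, hc3, hc4⟩ := pvOnes_bounds B A.length b hb
  refine ⟨by omega, by omega, by omega, by omega⟩

theorem pvTmp_sum (A B : List (List Int)) (x y : Int) :
    pvTmp A B x y = (((PySem.List.pyRange y (A.length : Int) 1).map
      (fun i => (PySem.List.pyRange x (A.length : Int) 1).countP
        (fun j => pvGet A i j == 1 && pvGet B (i - y) (j - x) == 1))).sum : Nat) := by
  unfold pvTmp
  simp only [PySem.List.foldl_if_add_one]
  rw [PySem.List.foldl_add]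
  rw [zero_add]
  rw [Nat.cast_list_sum, List.map_map]
  rfl
theorem pvOnesA_norm (A : List (List Int)) (h : ∀ r ∈ A, A.length ≤ r.length) :
    pvOnes A (A.length : Int) = (PySem.List.pyRange 0 (A.length : Int) 1).flatMap (fun i =>
      ((PySem.List.pyRange 0 (A.length : Int) 1).filter (fun j => pvGet A i j == 1)).map
        (fun j => (i, j))) := by
  unfold pvOnes
  rw [PySem.List.slice_to_natCast, List.take_length,
    PySem.List.enumerate_eq_map_pyRange A [], PySem.List.len_eq, List.flatMap_map]
  apply List.flatMap_congr
  intro i hi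
  obtain ⟨hi0, hin⟩ := PySem.List.mem_pyRange_one.mp hi
  have hiN : i.toNat < A.length := by omega
  have hrow : PySem.List.pyGetD A i [] = A[i.toNat] := PySem.List.pyGetD_eq_getElem A [] hi0 hin
  have hrlen : A.length ≤ (A[i.toNat]).length := h _ (List.getElem_mem hiN)
  simp only [hrow]
  rw [PySem.List.slice_to_natCast, PySem.List.enumerate_eq_map_pyRange _ (0 : Int),
    PySem.List.len_eq, List.length_take, Nat.min_eq_left hrlen, List.filter_map, List.map_map]
  have hcomp : ((fun jv : Int × Int => (i, jv.1)) ∘ fun j => (j, PySem.List.pyGetD (A[i.toNat].take A.length) j 0))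
      = fun j => (i, j) := by funext j; rfl
  rw [hcomp]
  congr 1
  apply List.filter_congr
  intro j hj
  obtain ⟨hj0, hjn⟩ := PySem.List.mem_pyRange_one.mp hj
  have hjN : j.toNat < (A[i.toNat].take A.length).length := by
    rw [List.length_take, Nat.min_eq_left hrlen]; omega
  have hjN' : j.toNat < (A[i.toNat]).length := by omega
  simp only [Function.comp_apply]
  rw [PySem.List.pyGetD_eq_getElem _ _ hj0 (by rw [List.length_take]; push_cast; omega), List.getElem_take]
  unfold pvGet
  rw [hrow, PySem.List.pyGetD_eq_getElem _ _ hj0 (by omega)]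

theorem pvGet_eq (M : List (List Int)) (p q : Int) (hp0 : 0 ≤ p) (hp : p.toNat < M.length)
    (hq0 : 0 ≤ q) (hq : q.toNat < (M.getD p.toNat []).length) :
    pvGet M p q = (M.getD p.toNat []).getD q.toNat 0 := by
  unfold pvGet
  have h1 : PySem.List.pyGetD M p [] = M[p.toNat]'hp := PySem.List.pyGetD_eq_getElem M [] hp0 (by omega)
  have h2 : M.getD p.toNat [] = M[p.toNat]'hp := List.getD_eq_getElem _ _ hp
  rw [h1, ← h2, PySem.List.pyGetD_eq_getElem _ 0 hq0 (by omega), List.getD_eq_getElem _ _ hq]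

-- count of a 1-cell of B, as the indicator of pvGet, valid when paired with a 1 of A under Pre

theorem pvCellB (A B : List (List Int)) (hPre : Pre_shiftCount A B) (i j : Int)
    (hi0 : 0 ≤ i) (hin : i < (A.length : Int)) (hj0 : 0 ≤ j) (hjn : j < (A.length : Int))
    (hA : pvGet A i j = 1) (p q : Int) (hp0 : 0 ≤ p) (hpi : p ≤ i) (hq0 : 0 ≤ q) (hqj : q ≤ j) :
    ((p, q) ∈ pvOnes B (A.length : Int)) ↔ pvGet B p q = 1 := by
  obtain ⟨h1, h2⟩ := hPre
  have hiN : i.toNat < A.length := by omega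
  have hrlen : A.length ≤ (A[i.toNat]).length := h1 _ (List.getElem_mem hiN)
  have hjN : j.toNat < (A[i.toNat]).length := by omega
  have hA' : (A.getD i.toNat []).getD j.toNat 0 = 1 := by
    rw [← pvGet_eq A i j hi0 hiN hj0 (by rw [List.getD_eq_getElem _ _ hiN]; omega)]
    exact hA
  obtain ⟨hBlen, hBrow⟩ := h2 i.toNat hiN j.toNat (by omega) hA'
  have hpN : p.toNat < B.length := by omega
  have hrowq : q.toNat < (B.getD p.toNat []).length := by
    have := hBrow p.toNat (by omega); omega
  rw [pvOnes_mem B A.length (p, q)]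
  constructor
  · rintro ⟨i', j', heq, hn1, hn2, hn3, hn4, hv⟩
    rw [Prod.ext_iff] at heq
    obtain ⟨e1, e2⟩ := heq
    simp only [] at e1 e2
    have ep : p.toNat = i' := by omega
    have eq' : q.toNat = j' := by omega
    rw [pvGet_eq B p q hp0 (by omega) hq0 (by rw [ep, eq']; exact hn4)]
    rw [ep, eq']; exact hv
  · intro hB
    refine ⟨p.toNat, q.toNat, by ext <;> simp <;> omega, by omega, hpN, by omega, hrowq, ?_⟩
    rw [← pvGet_eq B p q hp0 hpN hq0 hrowq]
    exact hB

def pvRow (A B : List (List Int)) (x y i : Int) : Nat :=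
  (((PySem.List.pyRange 0 (A.length : Int) 1).filter (fun j => pvGet A i j == 1)).map
    (fun j => (pvOnes B (A.length : Int)).count (i - y, j - x))).sum

theorem pvRow_zero (A B : List (List Int)) (x y i : Int) (hiy : i < y) :
    pvRow A B x y i = 0 := by
  apply List.sum_eq_zero
  intro c hc
  simp only [List.mem_map] at hc
  obtain ⟨j, _, rfl⟩ := hc
  apply List.count_eq_zero.mpr
  intro hmem
  have := pvOnes_bounds B A.length _ hmem
  simp only [] at this
  omega

theorem pvRow_eq (A B : List (List Int)) (hPre : Pre_shiftCount A B) (x y i : Int)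
    (hx0 : 0 ≤ x) (hxn : x < (A.length : Int)) (hy0 : 0 ≤ y)
    (hiy : y ≤ i) (hin : i < (A.length : Int)) :
    pvRow A B x y i = (PySem.List.pyRange x (A.length : Int) 1).countP
      (fun j => pvGet A i j == 1 && pvGet B (i - y) (j - x) == 1) := by
  unfold pvRow
  rw [PySem.List.pyRange_one_append 0 x (A.length : Int) hx0 (by omega),
    List.filter_append, List.map_append, List.sum_append]
  have h0 : ((((PySem.List.pyRange 0 x 1).filter (fun j => pvGet A i j == 1)).map
      (fun j => (pvOnes B (A.length : Int)).count (i - y, j - x))).sum) = 0 := by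
    apply List.sum_eq_zero
    intro c hc
    simp only [List.mem_map, List.mem_filter] at hc
    obtain ⟨j, ⟨hj, _⟩, rfl⟩ := hc
    obtain ⟨_, hjx⟩ := PySem.List.mem_pyRange_one.mp hj
    apply List.count_eq_zero.mpr
    intro hmem
    have := pvOnes_bounds B A.length _ hmem
    simp only [] at this
    omega
  rw [h0, zero_add]
  have hcong : (((PySem.List.pyRange x (A.length : Int) 1).filter (fun j => pvGet A i j == 1)).map
      (fun j => (pvOnes B (A.length : Int)).count (i - y, j - x)))
      = (((PySem.List.pyRange x (A.length : Int) 1).filter (fun j => pvGet A i j == 1)).map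
      (fun j => if pvGet B (i - y) (j - x) == 1 then 1 else 0)) := by
    apply List.map_congr_left
    intro j hj
    simp only [List.mem_filter] at hj
    obtain ⟨hjr, hjA⟩ := hj
    obtain ⟨hjx, hjn⟩ := PySem.List.mem_pyRange_one.mp hjr
    rw [pvOnes_count]
    rw [if_congr (Iff.trans (pvCellB A B hPre i j (by omega) hin (by omega) hjn
      (by simpa using hjA) (i - y) (j - x) (by omega) (by omega) (by omega) (by omega))
      (beq_iff_eq).symm) rfl rfl]
  rw [hcong, PySem.List.sum_map_ite_one_zero_nat, List.countP_filter]
  apply List.countP_congr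
  intro j _
  constructor
  · rintro h
    rw [Bool.and_comm]; exact h
  · intro h; rw [Bool.and_comm]; exact h

theorem pvTmp_eq_count (A B : List (List Int)) (hPre : Pre_shiftCount A B) (x y : Int)
    (hx0 : 0 ≤ x) (hxn : x < (A.length : Int)) (hy0 : 0 ≤ y) (hyn : y < (A.length : Int)) :
    pvTmp A B x y = ((pvOffs A B).count (y, x) : Int) := by
  rw [pvTmp_sum, pvOffs_count A B y x hy0 hx0, pvOnesA_norm A hPre.1]
  congr 1
  rw [List.map_flatMap, List.flatMap_def, List.sum_flatten, List.map_map]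
  have hshape : (List.sum ∘ fun i =>
      List.map (fun p : Int × Int => (pvOnes B (A.length : Int)).count (p.1 - y, p.2 - x))
        (List.map (fun j => (i, j))
          ((PySem.List.pyRange 0 (A.length : Int) 1).filter (fun j => pvGet A i j == 1))))
      = pvRow A B x y := by
    funext i
    simp only [Function.comp_apply, List.map_map, pvRow]
    rfl
  rw [hshape]
  rw [PySem.List.pyRange_one_append 0 y (A.length : Int) hy0 (by omega),
    List.map_append, List.sum_append]
  have h0 : (List.map (pvRow A B x y) (PySem.List.pyRange 0 y 1)).sum = 0 := by
    apply List.sum_eq_zero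
    intro c hc
    simp only [List.mem_map] at hc
    obtain ⟨i, hi, rfl⟩ := hc
    exact pvRow_zero A B x y i (PySem.List.mem_pyRange_one.mp hi).2
  rw [h0, zero_add]
  apply congrArg
  apply List.map_congr_left
  intro i hi
  obtain ⟨hiy, hin⟩ := PySem.List.mem_pyRange_one.mp hi
  exact (pvRow_eq A B hPre x y i hx0 hxn hy0 hiy hin).symm

theorem pvAlt_char (A B : List (List Int)) :
    0 ≤ shiftCount_alt A B ∧
    (∀ k ∈ pvOffs A B, ((pvOffs A B).count k : Int) ≤ shiftCount_alt A B) ∧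
    (shiftCount_alt A B = 0 ∨ ∃ k ∈ pvOffs A B, shiftCount_alt A B = ((pvOffs A B).count k : Int)) := by
  have h1 : ((pvOffs A B).foldl (fun d k => d.insert k (d.getD k 0 + 1)) PySem.Dict.empty)
      = PySem.Dict.counter (pvOffs A B) :=
    PySem.Dict.foldl_insert_getD_add_one_eq_counter (pvOffs A B)
  have h2 : (PySem.Dict.counter (pvOffs A B)).values
      = (PySem.Set.ofList (pvOffs A B)).map (fun k => ((pvOffs A B).count k : Int)) := by
    simp only [PySem.Dict.values, PySem.Dict.items_counter, List.map_map]
    rfl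
  have halt : shiftCount_alt A B = (match PySem.List.max?
      ((PySem.Set.ofList (pvOffs A B)).map (fun k => ((pvOffs A B).count k : Int)))
      (fun v => v) with | none => 0 | some m => m) := by
    unfold shiftCount_alt
    rw [h1]
    simp only []
    rw [h2]
  rcases hmax : PySem.List.max?
      ((PySem.Set.ofList (pvOffs A B)).map (fun k => ((pvOffs A B).count k : Int)))
      (fun v => v) with _ | m
  · have hnil := (PySem.List.max?_eq_none_iff _ _).mp hmax
    have hS : PySem.Set.ofList (pvOffs A B) = [] := List.map_eq_nil_iff.mp hnil
    rw [halt, hmax]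
    refine ⟨le_refl 0, ?_, Or.inl rfl⟩
    intro k hk
    have := (PySem.Set.mem_ofList (pvOffs A B) k).mpr hk
    rw [hS] at this
    exact absurd this (List.not_mem_nil)
  · obtain ⟨k', hk'S, hk'⟩ := List.mem_map.mp (PySem.List.max?_mem hmax)
    rw [halt, hmax]
    refine ⟨?_, ?_, Or.inr ⟨k', (PySem.Set.mem_ofList _ _).mp hk'S, hk'.symm⟩⟩
    · rw [← hk']; exact Int.natCast_nonneg _
    · intro k hk
      have hmem : ((pvOffs A B).count k : Int) ∈ (PySem.Set.ofList (pvOffs A B)).map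
          (fun k => ((pvOffs A B).count k : Int)) :=
        List.mem_map.mpr ⟨k, (PySem.Set.mem_ofList _ _).mpr hk, rfl⟩
      exact PySem.List.max?_isMax hmax _ hmem


-- ===== VERDICT (by name: the statement is the Claim_ definition above) =====
theorem shiftCount_spec : Claim_equal_shiftCount := by
  unfold Claim_equal_shiftCount
  intro A B _ hPre
  unfold Spec_shiftCount
  obtain ⟨hA1, hA2, hA3⟩ := pvMax2 (PySem.List.pyRange 0 (A.length : Int) 1)
    (PySem.List.pyRange 0 (A.length : Int) 1) (pvTmp A B) 0
  obtain ⟨hB1, hB2, hB3⟩ := pvAlt_char A B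
  rw [shiftCount_eq]
  apply le_antisymm
  · rcases hA3 with h0 | ⟨x, hx, y, hy, hr⟩
    · rw [h0]; exact hB1
    · rw [hr]
      obtain ⟨hx0, hxn⟩ := PySem.List.mem_pyRange_one.mp hx
      obtain ⟨hy0, hyn⟩ := PySem.List.mem_pyRange_one.mp hy
      rw [pvTmp_eq_count A B hPre x y hx0 hxn hy0 hyn]
      by_cases hmem : (y, x) ∈ pvOffs A B
      · exact hB2 _ hmem
      · rw [List.count_eq_zero.mpr hmem]; exact_mod_cast hB1
  · rcases hB3 with h0 | ⟨k, hk, hc⟩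
    · rw [h0]; exact hA1
    · obtain ⟨hk1, hk2, hk3, hk4⟩ := pvOffs_bounds A B k hk
      have := hA2 k.2 (PySem.List.mem_pyRange_one.mpr ⟨hk3, hk4⟩)
        k.1 (PySem.List.mem_pyRange_one.mpr ⟨hk1, hk2⟩)
      rw [pvTmp_eq_count A B hPre k.2 k.1 hk3 hk4 hk1 hk2] at this
      rw [hc]
      exact this
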